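-- pv_equiv track=rewrite | github.com/rpd-512/ProjectTrinity | gate_counting/experiments.py | check_unary_complete
-- ===== SOURCE A (Python) =====
-- def check_unary_complete(gate_tt):
--     """Check if a binary-arity ternary gate is unary complete.
--
--     Uses bitset representation for the set of generated unary functions
--     and a precomputed composition table for speed.
--     """
--     # Flat gate lookup: gl[a*3+b] = output
--     gl = list(gate_tt)
--
--     # Precompute all 27 unary function values
--     u_vals = []
--     for code in range(27):
--         u_vals.append((code % 3, (code // 3) % 3, code // 9))
--
--     # Precompute composition table: comp[fi*27+gi] = hi
--     comp = [0] * 729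
--     for fi in range(27):
--         f = u_vals[fi]
--         base = fi * 27
--         for gi in range(27):
--             g = u_vals[gi]
--             h0 = gl[f[0] * 3 + g[0]]
--             h1 = gl[f[1] * 3 + g[1]]
--             h2 = gl[f[2] * 3 + g[2]]
--             comp[base + gi] = h0 + 3 * h1 + 9 * h2
--
--     # arb(x) = gate(x, x)
--     arb = gl[0] + 3 * gl[4] + 9 * gl[8]
--     identity = 21  # 0 + 3*1 + 9*2
--
--     S = (1 << arb) | (1 << identity)
--     ALL_BITS = (1 << 27) - 1
--
--     changed = True
--     while changed:
--         if S == ALL_BITS: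
--             return True
--         changed = False
--         current = []
--         bits = S
--         for i in range(27):
--             if bits & 1:
--                 current.append(i)
--             bits >>= 1
--
--         for fi in current:
--             base = fi * 27
--             for gi in current:
--                 hi = comp[base + gi]
--                 if not (S & (1 << hi)):
--                     S |= (1 << hi)
--                     changed = True
--
--     return S == ALL_BITS
-- ===== SOURCE B (Python) =====
-- def check_unary_complete(gate_tt):
--     """Check if a binary-arity ternary gate is unary complete.
--
--     Bitset worklist closure: S holds one bit per generated unary-function
--     code.  Seed it with gate(x,x) and the identity, then pop one unprocessed
--     code at a time, compose it (in both orders) with every code currently in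
--     S, and queue the codes whose bits are new; done when the worklist is
--     empty.
--     """
--     def compose(f, g):
--         return (gate_tt[f % 3 * 3 + g % 3]
--                 + 3 * gate_tt[f // 3 % 3 * 3 + g // 3 % 3]
--                 + 9 * gate_tt[f // 9 * 3 + g // 9])
--
--     arb = gate_tt[0] + 3 * gate_tt[4] + 9 * gate_tt[8]
--     S = (1 << arb) | (1 << 21)  # 21 = 0 + 3*1 + 9*2, the identity
--     todo = [f for f in range(27) if S >> f & 1]
--     while todo:
--         f = todo.pop()
--         before = S
--         for g in [g for g in range(27) if S >> g & 1]:
--             S |= 1 << compose(f, g)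
--             S |= 1 << compose(g, f)
--         todo += [h for h in range(27) if S >> h & 1 and not before >> h & 1]
--     return S == (1 << 27) - 1
-- ===== Notes on version B (the rewrite author's own statement) =====
-- stated objective: alternative
-- what changed: Replaces A's round-based fixpoint (precomputed 27 u_vals triples, a 729-entry composition table, and repeated full rescans of all current pairs under a changed flag) with a direct worklist closure on the same bitset: each newly discovered code is popped once and composed in both orders against the codes currently in the set, so no composition table is built and no pair is rescanned round after round; …
-- outside the precondition, e.g. on check_unary_complete([3, 0, 0, 0, 0, 0, 0, 0, 0]): A returns False, B returns False; on check_unary_complete([2, 2, 2, 1, 1, 1, 3, 0, 1]): A returns False, B returns False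
import Mathlib
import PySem

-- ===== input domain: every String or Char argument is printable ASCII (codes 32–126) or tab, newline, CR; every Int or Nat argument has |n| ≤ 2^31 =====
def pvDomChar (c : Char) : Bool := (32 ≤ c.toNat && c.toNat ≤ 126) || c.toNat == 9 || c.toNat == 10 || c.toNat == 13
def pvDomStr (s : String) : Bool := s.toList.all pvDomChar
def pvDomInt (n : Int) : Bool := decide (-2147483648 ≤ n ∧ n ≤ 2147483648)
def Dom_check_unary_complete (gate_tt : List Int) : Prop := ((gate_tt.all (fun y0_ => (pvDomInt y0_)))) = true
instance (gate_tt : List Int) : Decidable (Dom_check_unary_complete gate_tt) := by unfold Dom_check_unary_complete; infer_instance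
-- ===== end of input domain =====

-- B replaces A's round-based rescan fixpoint (and its precomputed 729-entry composition
-- table) by a direct worklist closure on the same bitset; objective: alternative.

-- ===== PORT A =====
-- A's u_vals loop: all 27 unary functions as value triples
def pvUvalsA : List (Int × Int × Int) :=
  (PySem.List.pyRange 0 27 1).foldl
    (fun acc code =>
      acc ++ [(PySem.Int.mod code 3, PySem.Int.mod (PySem.Int.floordiv code 3) 3,
               PySem.Int.floordiv code 9)])
    []

-- A's comp-table inner statement: comp[base + gi] = h0 + 3*h1 + 9*h2
def pvCompBody (gl : List Int) (f : Int × Int × Int) (base : Int) (comp : List Int) (gi : Int) :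
    List Int :=
  let g := PySem.List.pyGetD pvUvalsA gi (0, 0, 0)
  let h0 := PySem.List.pyGetD gl (f.1 * 3 + g.1) 0
  let h1 := PySem.List.pyGetD gl (f.2.1 * 3 + g.2.1) 0
  let h2 := PySem.List.pyGetD gl (f.2.2 * 3 + g.2.2) 0
  PySem.List.pySetD comp (base + gi) (h0 + 3 * h1 + 9 * h2)

-- A's comp-table inner loop: for gi in range(27)
def pvCompInner (gl : List Int) (f : Int × Int × Int) (base : Int) (comp : List Int) : List Int :=
  (PySem.List.pyRange 0 27 1).foldl (pvCompBody gl f base) comp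

-- A's comp-table outer body: f = u_vals[fi]; base = fi * 27
def pvCompOuterBody (gl : List Int) (comp : List Int) (fi : Int) : List Int :=
  let f := PySem.List.pyGetD pvUvalsA fi (0, 0, 0)
  let base := fi * 27
  pvCompInner gl f base comp

-- A's comp table, built by assignment into [0]*729
def pvCompA (gl : List Int) : List Int :=
  (PySem.List.pyRange 0 27 1).foldl (pvCompOuterBody gl) (List.replicate 729 0)

-- A's bit-extraction statement: `if bits & 1: current.append(i)` then `bits >>= 1`
def pvBitBody (st : List Int × Nat) (i : Int) : List Int × Nat :=
  (if st.2 &&& 1 == 1 then st.1 ++ [i] else st.1, st.2 >>> 1)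

-- A's bit-extraction loop: current = the set bits of S
def pvCurrentA (S : Nat) : List Int :=
  ((PySem.List.pyRange 0 27 1).foldl pvBitBody ([], S)).1

-- A's inner statement: `if not (S & (1 << hi)): S |= 1 << hi; changed = True`
def pvAddStep (v : Int → Nat) (st : Nat × Bool) (x : Int) : Nat × Bool :=
  if st.1 &&& (1 <<< v x) == 0 then (st.1 ||| (1 <<< v x), true) else st

-- A's double loop over `current` for one round of the fixpoint
def pvRoundA (comp : List Int) (current : List Int) (S : Nat) : Nat × Bool :=
  current.foldl
    (fun st fi =>
      let base := fi * 27
      current.foldl (pvAddStep fun gi => (PySem.List.pyGetD comp (base + gi) 0).toNat) st)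
    (S, false)

-- A's `while changed` loop; fuel only makes the recursion structural (each changed round
-- strictly grows S, so fuel 2^27 is never exhausted while S stays below 2^27 — see pvLoopA_spec)
def pvLoopA (comp : List Int) : Nat → Nat → Bool
  | 0, S => S == (1 <<< 27) - 1
  | fuel + 1, S =>
    if S == (1 <<< 27) - 1 then true
    else
      let st := pvRoundA comp (pvCurrentA S) S
      if st.2 then pvLoopA comp fuel st.1 else st.1 == (1 <<< 27) - 1

def check_unary_complete (gate_tt : List Int) : Bool :=
  let gl := gate_tt
  let comp := pvCompA gl
  let arb := PySem.List.pyGetD gl 0 0 + 3 * PySem.List.pyGetD gl 4 0 + 9 * PySem.List.pyGetD gl 8 0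
  let identity : Nat := 21
  -- Python's unbounded-int bitset is a Nat here: exact since arb ≥ 0 under Pre_
  let S : Nat := (1 <<< arb.toNat) ||| (1 <<< identity)
  pvLoopA comp (1 <<< 27) S

-- ===== PORT B =====
-- B's compose(f, g): gate applied pointwise to the two decoded unary functions
def pvCmp (t : List Int) (f g : Int) : Int :=
  PySem.List.pyGetD t (PySem.Int.mod f 3 * 3 + PySem.Int.mod g 3) 0
  + 3 * PySem.List.pyGetD t (PySem.Int.mod (PySem.Int.floordiv f 3) 3 * 3
        + PySem.Int.mod (PySem.Int.floordiv g 3) 3) 0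
  + 9 * PySem.List.pyGetD t (PySem.Int.floordiv f 9 * 3 + PySem.Int.floordiv g 9) 0

-- B's `[f for f in range(27) if S >> f & 1]`
def pvScanB (S : Nat) : List Int :=
  (PySem.List.pyRange 0 27 1).foldl
    (fun acc i => if S >>> i.toNat &&& 1 == 1 then acc ++ [i] else acc) []

-- B's `[h for h in range(27) if S >> h & 1 and not before >> h & 1]`
def pvNewB (before S : Nat) : List Int :=
  (PySem.List.pyRange 0 27 1).foldl
    (fun acc i => if (S >>> i.toNat &&& 1 == 1) && !(before >>> i.toNat &&& 1 == 1)
      then acc ++ [i] else acc) []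

-- B's inner statements: S |= 1 << compose(f, g); S |= 1 << compose(g, f)
def pvInnerB (t : List Int) (f : Int) (S : Nat) (g : Int) : Nat :=
  (S ||| (1 <<< (pvCmp t f g).toNat)) ||| (1 <<< (pvCmp t g f).toNat)

-- B's `for g in [...]` loop for one popped code f
def pvStepB (t : List Int) (f : Int) (S : Nat) : Nat :=
  (pvScanB S).foldl (pvInnerB t f) S

-- B's `while todo` loop; todo.pop() pops the LAST element; fuel only makes the recursion
-- structural (the worklist measure shrinks every iteration, so fuel 64 is never exhausted
-- under Pre_ — see pvLoopB_spec)
def pvLoopB (t : List Int) : Nat → Nat → List Int → Bool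
  | 0, S, _ => S == (1 <<< 27) - 1
  | fuel + 1, S, todo =>
    match todo.getLast? with
    | none => S == (1 <<< 27) - 1
    | some f =>
      let before := S
      let S2 := pvStepB t f S
      pvLoopB t fuel S2 (todo.dropLast ++ pvNewB before S2)

def check_unary_complete_alt (gate_tt : List Int) : Bool :=
  let arb := PySem.List.pyGetD gate_tt 0 0 + 3 * PySem.List.pyGetD gate_tt 4 0
           + 9 * PySem.List.pyGetD gate_tt 8 0
  -- Python's unbounded-int bitset is a Nat here: exact since arb ≥ 0 under Pre_
  let S : Nat := (1 <<< arb.toNat) ||| (1 <<< 21)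
  let todo := pvScanB S
  pvLoopB gate_tt 64 S todo

-- ===== PRECONDITION & SPEC =====
-- the code of x ↦ gate(x, x), which both versions seed the closure with
def pvArb (t : List Int) : Int :=
  PySem.List.pyGetD t 0 0 + 3 * PySem.List.pyGetD t 4 0 + 9 * PySem.List.pyGetD t 8 0

-- Pre_ asks for at least the 9 entries a binary ternary gate has, and either a well-formed
-- table (outputs in {0,1,2}) or a diagonal code arb ≥ 27, where A's closure loop dies at once.
-- Outside Pre_ equivalence is not claimed: there A raises (IndexError on a short list,
-- ValueError on 1 << negative whenever a negative entry is reached — a dynamic, not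
-- closed-form, condition) or returns an accidental False of its bitset encoding (see cites).
def Pre_check_unary_complete (gate_tt : List Int) : Prop :=
  9 ≤ gate_tt.length ∧
    ((∀ i ∈ List.range 9, gate_tt.getD i 0 = 0 ∨ gate_tt.getD i 0 = 1 ∨ gate_tt.getD i 0 = 2) ∨
      27 ≤ pvArb gate_tt)
instance (gate_tt : List Int) : Decidable (Pre_check_unary_complete gate_tt) := by
  unfold Pre_check_unary_complete; infer_instance

def pvWitness_check_unary_complete : List Int := [0, 1, 2, 1, 2, 0, 2, 0, 1]

def Spec_check_unary_complete (gate_tt : List Int) (out : Bool) : Prop :=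
  out = check_unary_complete_alt gate_tt
instance (gate_tt : List Int) (out : Bool) : Decidable (Spec_check_unary_complete gate_tt out) := by
  unfold Spec_check_unary_complete; infer_instance

-- ===== CLAIM (what is proved, stated in full; the proofs are below) =====
def Claim_equal_check_unary_complete : Prop :=
  ∀ (gate_tt : List Int), Dom_check_unary_complete gate_tt →
    Pre_check_unary_complete gate_tt →
      Spec_check_unary_complete gate_tt (check_unary_complete gate_tt)

-- ===== LEMMAS AND PROOFS =====

-- the well-formed-table regime of Pre_
def pvWF (t : List Int) : Prop :=
  9 ≤ t.length ∧
    ∀ i ∈ List.range 9, t.getD i 0 = 0 ∨ t.getD i 0 = 1 ∨ t.getD i 0 = 2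

-- the inductively generated set of codes both versions compute the closure of
inductive pvGen (t : List Int) : Int → Prop
  | arb : pvGen t (pvArb t)
  | id : pvGen t 21
  | comp {f g : Int} : pvGen t f → pvGen t g → pvGen t (pvCmp t f g)

-- bounds
lemma pv_gate_bound (t : List Int) (hp : pvWF t) (i : Int)
    (h0 : 0 ≤ i) (h9 : i < 9) : 0 ≤ PySem.List.pyGetD t i 0 ∧ PySem.List.pyGetD t i 0 < 3 := by
  rw [PySem.List.pyGetD_of_nonneg t 0 h0]
  have := hp.2 i.toNat (List.mem_range.mpr (by omega))
  rcases this with h | h | h <;> omega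

lemma pv_mod3_bound (x : Int) : 0 ≤ PySem.Int.mod x 3 ∧ PySem.Int.mod x 3 < 3 :=
  ⟨PySem.Int.mod_nonneg _ (by omega), PySem.Int.mod_lt _ (by omega)⟩

lemma pv_div9_bound {f : Int} (h0 : 0 ≤ f) (h27 : f < 27) :
    0 ≤ PySem.Int.floordiv f 9 ∧ PySem.Int.floordiv f 9 < 3 := by
  constructor
  · rw [PySem.Int.le_floordiv_iff_mul_le (by omega)]; omega
  · rw [PySem.Int.floordiv_lt_iff_lt_mul (by omega)]; omega

lemma pv_cmp_bound (t : List Int) (hp : pvWF t) {f g : Int}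
    (hf : 0 ≤ f ∧ f < 27) (hg : 0 ≤ g ∧ g < 27) :
    0 ≤ pvCmp t f g ∧ pvCmp t f g < 27 := by
  have m1 := pv_mod3_bound f
  have m2 := pv_mod3_bound g
  have m3 := pv_mod3_bound (PySem.Int.floordiv f 3)
  have m4 := pv_mod3_bound (PySem.Int.floordiv g 3)
  have d1 := pv_div9_bound hf.1 hf.2
  have d2 := pv_div9_bound hg.1 hg.2
  have b1 := pv_gate_bound t hp _ (by omega) (by omega : PySem.Int.mod f 3 * 3 + PySem.Int.mod g 3 < 9)
  have b2 := pv_gate_bound t hp _ (by omega)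
    (by omega : PySem.Int.mod (PySem.Int.floordiv f 3) 3 * 3 + PySem.Int.mod (PySem.Int.floordiv g 3) 3 < 9)
  have b3 := pv_gate_bound t hp _ (by omega)
    (by omega : PySem.Int.floordiv f 9 * 3 + PySem.Int.floordiv g 9 < 9)
  unfold pvCmp
  omega

lemma pv_arb_bound (t : List Int) (hp : pvWF t) :
    0 ≤ pvArb t ∧ pvArb t < 27 := by
  have b1 := pv_gate_bound t hp 0 (by omega) (by omega)
  have b2 := pv_gate_bound t hp 4 (by omega) (by omega)
  have b3 := pv_gate_bound t hp 8 (by omega) (by omega)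
  unfold pvArb
  omega

lemma pv_gen_bound (t : List Int) (hp : pvWF t) {c : Int}
    (h : pvGen t c) : 0 ≤ c ∧ c < 27 := by
  induction h with
  | arb => exact pv_arb_bound t hp
  | id => omega
  | comp hf hg ihf ihg => exact pv_cmp_bound t hp ihf ihg

-- decoding a code into its value triple, and composing through the gate
def pvDec (c : Int) : Int × Int × Int :=
  (PySem.Int.mod c 3, PySem.Int.mod (PySem.Int.floordiv c 3) 3, PySem.Int.floordiv c 9)

lemma pvUvalsA_getD (fi : Int) (h0 : 0 ≤ fi) (h27 : fi < 27) :
    PySem.List.pyGetD pvUvalsA fi (0, 0, 0) = pvDec fi := by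
  unfold pvUvalsA
  rw [PySem.List.foldl_append_singleton_eq_map, List.nil_append]
  exact PySem.List.pyGetD_map_pyRange_of_nonneg _ 27 fi _ h0 h27

lemma pvCmp_eq_dec (t : List Int) (f g : Int) :
    pvCmp t f g = PySem.List.pyGetD t ((pvDec f).1 * 3 + (pvDec g).1) 0
      + 3 * PySem.List.pyGetD t ((pvDec f).2.1 * 3 + (pvDec g).2.1) 0
      + 9 * PySem.List.pyGetD t ((pvDec f).2.2 * 3 + (pvDec g).2.2) 0 := rfl

lemma pvCompBody_set (gl : List Int) (a : ℕ) (C : List Int) (gi : Int)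
    (hg0 : 0 ≤ gi) (hg27 : gi < 27) :
    pvCompBody gl (pvDec (↑a)) ((↑a : Int) * 27) C gi =
      C.set (a * 27 + gi.toNat) (pvCmp gl (↑a) gi) := by
  unfold pvCompBody
  rw [pvUvalsA_getD gi hg0 hg27]
  rw [PySem.List.pySetD_of_nonneg _ _ (by positivity)]
  rw [show ((↑a : Int) * 27 + gi).toNat = a * 27 + gi.toNat by omega]
  rw [pvCmp_eq_dec]

-- characterization of the inner comp loop, generalized over the range bound
lemma pvCompInner_char (gl : List Int) (a : ℕ) (n : ℕ) :
    ∀ (C : List Int), a * 27 + n ≤ C.length → n ≤ 27 →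
      (((PySem.List.pyRange 0 (↑n) 1).foldl (pvCompBody gl (pvDec ↑a) ((↑a : Int) * 27)) C).length
          = C.length) ∧
        ∀ k : ℕ, ((PySem.List.pyRange 0 (↑n) 1).foldl
              (pvCompBody gl (pvDec ↑a) ((↑a : Int) * 27)) C).getD k 0 =
            if a * 27 ≤ k ∧ k < a * 27 + n then pvCmp gl ↑a ↑(k - a * 27) else C.getD k 0 := by
  induction n with
  | zero =>
    intro C hC hn
    rw [PySem.List.pyRange_one_eq_nil (by omega), List.foldl_nil]
    refine ⟨rfl, fun k => ?_⟩
    rw [if_neg (by omega)]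
  | succ m ih =>
    intro C hC hn
    have hcast : ((↑(m + 1) : Int)) = (↑m : Int) + 1 := by push_cast; ring
    rw [hcast, PySem.List.pyRange_one_succ_right (by positivity), List.foldl_append,
      List.foldl_cons, List.foldl_nil]
    obtain ⟨ihlen, ihget⟩ := ih C (by omega) (by omega)
    rw [pvCompBody_set gl a _ (↑m) (by positivity) (by exact_mod_cast hn)]
    constructor
    · rw [List.length_set, ihlen]
    · intro k
      rw [show ((↑m : Int)).toNat = m by omega]
      rw [List.getD_eq_getElem?_getD, List.getElem?_set]
      by_cases hk : a * 27 + m = k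
      · rw [if_pos hk, if_pos (by omega), if_pos (by omega)]
        rw [show k - a * 27 = m by omega]
        simp
      · rw [if_neg hk, ← List.getD_eq_getElem?_getD, ihget k]
        by_cases hin : a * 27 ≤ k ∧ k < a * 27 + m
        · rw [if_pos hin, if_pos (by omega)]
        · rw [if_neg hin, if_neg (by omega)]

lemma pvCompOuterBody_eq (gl : List Int) (C : List Int) (a : ℕ) (ha : a < 27) :
    pvCompOuterBody gl C (↑a) =
      (PySem.List.pyRange 0 27 1).foldl (pvCompBody gl (pvDec ↑a) ((↑a : Int) * 27)) C := by
  unfold pvCompOuterBody pvCompInner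
  rw [pvUvalsA_getD (↑a) (by positivity) (by exact_mod_cast ha)]

-- characterization of the whole comp table
lemma pvCompA_char (gl : List Int) (n : ℕ) (hn : n ≤ 27) :
    (((PySem.List.pyRange 0 (↑n) 1).foldl (pvCompOuterBody gl) (List.replicate 729 0)).length
        = 729) ∧
      ∀ k : ℕ, k < 729 →
        ((PySem.List.pyRange 0 (↑n) 1).foldl (pvCompOuterBody gl)
              (List.replicate 729 0)).getD k 0 =
          if k < n * 27 then pvCmp gl ↑(k / 27) ↑(k % 27) else 0 := by
  induction n with
  | zero =>
    rw [PySem.List.pyRange_one_eq_nil (by omega), List.foldl_nil]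
    refine ⟨List.length_replicate, fun k hk => ?_⟩
    rw [if_neg (by omega), List.getD_eq_getElem?_getD, List.getElem?_replicate, if_pos hk]
    rfl
  | succ m ih =>
    obtain ⟨ihlen, ihget⟩ := ih (by omega)
    have hcast : ((↑(m + 1) : Int)) = (↑m : Int) + 1 := by push_cast; ring
    rw [hcast, PySem.List.pyRange_one_succ_right (by positivity), List.foldl_append,
      List.foldl_cons, List.foldl_nil]
    rw [pvCompOuterBody_eq gl _ m (by omega)]
    obtain ⟨clen, cget⟩ := pvCompInner_char gl m 27
      ((PySem.List.pyRange 0 (↑m) 1).foldl (pvCompOuterBody gl) (List.replicate 729 0))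
      (by rw [ihlen]; omega) (by omega)
    rw [show ((27 : ℕ) : Int) = (27 : Int) by norm_num] at clen cget
    refine ⟨by rw [clen, ihlen], fun k hk => ?_⟩
    rw [cget k]
    by_cases hin : m * 27 ≤ k ∧ k < m * 27 + 27
    · rw [if_pos hin, if_pos (by omega)]
      rw [show k / 27 = m by omega, show k % 27 = k - m * 27 by omega]
    · rw [if_neg hin, ihget k hk]
      by_cases h2 : k < m * 27
      · rw [if_pos h2, if_pos (by omega)]
      · rw [if_neg h2, if_neg (by omega)]

lemma pvCompA_getD (t : List Int) (a b : ℕ) (ha : a < 27) (hb : b < 27) :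
    PySem.List.pyGetD (pvCompA t) ((↑a : Int) * 27 + ↑b) 0 = pvCmp t ↑a ↑b := by
  unfold pvCompA
  have h27 : (27 : Int) = ((27 : ℕ) : Int) := by norm_num
  rw [show ((↑a : Int) * 27 + ↑b) = ((a * 27 + b : ℕ) : Int) by push_cast; ring,
    PySem.List.pyGetD_natCast, h27]
  obtain ⟨-, hget⟩ := pvCompA_char t 27 (le_refl 27)
  rw [hget (a * 27 + b) (by omega), if_pos (by omega)]
  rw [show (a * 27 + b) / 27 = a by omega, show (a * 27 + b) % 27 = b by omega]

-- A's bit extraction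
lemma pv_testBit_eq (B n : Nat) : Nat.testBit B n = ((B >>> n) &&& 1 == 1) := by
  simp [Nat.testBit, Nat.and_one_is_mod, Nat.one_and_eq_mod_two]

lemma pvCurrent_char (n : ℕ) : ∀ (acc : List Int) (B : Nat),
    (PySem.List.pyRange 0 (↑n) 1).foldl pvBitBody (acc, B) =
      (acc ++ (List.range n).filterMap (fun i => if B.testBit i then some ((i : ℕ) : Int) else none),
        B >>> n) := by
  induction n with
  | zero =>
    intro acc B
    rw [PySem.List.pyRange_one_eq_nil (by omega), List.foldl_nil]
    simp
  | succ m ih =>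
    intro acc B
    rw [show ((↑(m + 1) : Int)) = (↑m : Int) + 1 by push_cast; ring,
      PySem.List.pyRange_one_succ_right (by positivity), List.foldl_append,
      List.foldl_cons, List.foldl_nil, ih acc B]
    unfold pvBitBody
    rw [show ((B >>> m) &&& 1 == 1) = B.testBit m from (pv_testBit_eq B m).symm]
    rw [List.range_succ, List.filterMap_append, ← Nat.shiftRight_add B m 1]
    rcases hb : B.testBit m <;> simp [hb]

lemma pvCurrentA_eq (S : Nat) :
    pvCurrentA S =
      (List.range 27).filterMap (fun i => if S.testBit i then some ((i : ℕ) : Int) else none) := by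
  unfold pvCurrentA
  rw [show (27 : Int) = ((27 : ℕ) : Int) by norm_num, pvCurrent_char 27 [] S]
  simp

lemma pv_mem_currentA {S : Nat} {c : Int} :
    c ∈ pvCurrentA S ↔ ∃ i : ℕ, i < 27 ∧ S.testBit i = true ∧ c = ↑i := by
  rw [pvCurrentA_eq]
  simp only [List.mem_filterMap, List.mem_range]
  constructor
  · rintro ⟨i, hi, hsome⟩
    rcases hb : S.testBit i
    · rw [hb] at hsome; simp at hsome
    · rw [hb] at hsome; simp at hsome
      exact ⟨i, hi, hb, hsome.symm⟩
  · rintro ⟨i, hi, hb, rfl⟩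
    exact ⟨i, hi, by rw [hb]; simp⟩

-- the `changed` round: bit-adding folds
lemma pv_and_pow (S h : ℕ) : (S &&& (1 <<< h) == 0) = !S.testBit h := by
  rw [Nat.one_shiftLeft]
  rcases hb : S.testBit h
  · simp [Nat.and_two_pow, hb]
  · simp [Nat.and_two_pow, hb]

lemma pvAddStep_bits (v : Int → ℕ) (st : ℕ × Bool) (x : Int) (c : ℕ) :
    ((pvAddStep v st x).1.testBit c = true) ↔ (st.1.testBit c = true ∨ c = v x) := by
  unfold pvAddStep
  split_ifs with hc
  · have hb : st.1.testBit (v x) = false := by rw [pv_and_pow] at hc; simpa using hc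
    simp only [Nat.testBit_or, Nat.one_shiftLeft, Nat.testBit_two_pow]
    rw [Bool.or_eq_true]
    constructor
    · rintro (h | h)
      · exact Or.inl h
      · exact Or.inr (of_decide_eq_true h).symm
    · rintro (h | h)
      · exact Or.inl h
      · exact Or.inr (decide_eq_true h.symm)
  · have hb : st.1.testBit (v x) = true := by rw [pv_and_pow] at hc; simpa using hc
    constructor
    · exact Or.inl
    · rintro (h | rfl)
      · exact h
      · exact hb

lemma pvAddStep_le (v : Int → ℕ) (st : ℕ × Bool) (x : Int) : st.1 ≤ (pvAddStep v st x).1 := by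
  unfold pvAddStep
  split_ifs
  · exact Nat.left_le_or
  · exact le_refl _

lemma pvAddStep_strict (v : Int → ℕ) (st : ℕ × Bool) (x : Int)
    (h : (pvAddStep v st x).2 = true) : st.2 = true ∨ st.1 < (pvAddStep v st x).1 := by
  unfold pvAddStep at h ⊢
  split_ifs at h ⊢ with hc
  · right
    have hb : st.1.testBit (v x) = false := by rw [pv_and_pow] at hc; simpa using hc
    refine lt_of_le_of_ne Nat.left_le_or (fun he : st.1 = st.1 ||| 1 <<< v x => ?_)
    have hbit : (st.1 ||| 1 <<< v x).testBit (v x) = true := by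
      rw [Nat.testBit_or, Nat.one_shiftLeft, Nat.testBit_two_pow]
      simp
    rw [← he, hb] at hbit
    exact Bool.false_ne_true hbit
  · exact Or.inl h

lemma pvAddFold_bits (v : Int → ℕ) (l : List Int) : ∀ (st : ℕ × Bool) (c : ℕ),
    ((l.foldl (pvAddStep v) st).1.testBit c = true) ↔
      (st.1.testBit c = true ∨ ∃ x ∈ l, c = v x) := by
  induction l with
  | nil => intro st c; simp
  | cons y ys ih =>
    intro st c
    rw [List.foldl_cons, ih]
    rw [pvAddStep_bits]
    constructor
    · rintro ((h | h) | ⟨x, hx, rfl⟩)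
      · exact Or.inl h
      · exact Or.inr ⟨y, List.mem_cons_self, h⟩
      · exact Or.inr ⟨x, List.mem_cons_of_mem y hx, rfl⟩
    · rintro (h | ⟨x, hx, rfl⟩)
      · exact Or.inl (Or.inl h)
      · rcases List.mem_cons.mp hx with rfl | hx
        · exact Or.inl (Or.inr rfl)
        · exact Or.inr ⟨x, hx, rfl⟩

lemma pvAddFold_flag_false (v : Int → ℕ) (l : List Int) : ∀ (st : ℕ × Bool),
    (l.foldl (pvAddStep v) st).2 = false →
      (l.foldl (pvAddStep v) st).1 = st.1 ∧ st.2 = false ∧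
        ∀ x ∈ l, st.1.testBit (v x) = true := by
  induction l with
  | nil => intro st h; exact ⟨rfl, h, by simp⟩
  | cons y ys ih =>
    intro st h
    rw [List.foldl_cons] at h ⊢
    have hpair : pvAddStep v st y = st ∧ st.1.testBit (v y) = true := by
      have h2 := (ih _ h).2.1
      unfold pvAddStep at h2 ⊢
      split_ifs at h2 ⊢ with hc
      exact ⟨rfl, by rw [pv_and_pow] at hc; simpa using hc⟩
    rw [hpair.1] at h
    obtain ⟨h1, h2, h3⟩ := ih _ h
    rw [hpair.1]
    refine ⟨h1, h2, fun x hx => ?_⟩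
    rcases List.mem_cons.mp hx with rfl | hx
    · exact hpair.2
    · exact h3 x hx

lemma pvAddFold_le (v : Int → ℕ) (l : List Int) : ∀ (st : ℕ × Bool),
    st.1 ≤ (l.foldl (pvAddStep v) st).1 := by
  induction l with
  | nil => intro st; exact le_refl _
  | cons y ys ih =>
    intro st
    exact le_trans (pvAddStep_le v st y) (ih _)

lemma pvAddFold_strict (v : Int → ℕ) (l : List Int) : ∀ (st : ℕ × Bool),
    (l.foldl (pvAddStep v) st).2 = true → st.2 = true ∨ st.1 < (l.foldl (pvAddStep v) st).1 := by
  induction l with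
  | nil => intro st h; exact Or.inl h
  | cons y ys ih =>
    intro st h
    rw [List.foldl_cons] at h ⊢
    rcases ih _ h with h2 | h2
    · rcases pvAddStep_strict v st y h2 with h3 | h3
      · exact Or.inl h3
      · exact Or.inr (lt_of_lt_of_le h3 (pvAddFold_le v ys _))
    · exact Or.inr (lt_of_le_of_lt (pvAddStep_le v st y) h2)

-- one round of A's fixpoint
def pvV (comp : List Int) (fi gi : Int) : ℕ := (PySem.List.pyGetD comp (fi * 27 + gi) 0).toNat

lemma pvRoundA_eq (comp cur : List Int) (S : Nat) :
    pvRoundA comp cur S =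
      cur.foldl (fun st fi => cur.foldl (pvAddStep (pvV comp fi)) st) (S, false) := rfl

lemma pvRoundFold_bits (comp cur : List Int) (l : List Int) : ∀ (st : ℕ × Bool) (c : ℕ),
    ((l.foldl (fun st fi => cur.foldl (pvAddStep (pvV comp fi)) st) st).1.testBit c = true) ↔
      (st.1.testBit c = true ∨ ∃ fi ∈ l, ∃ gi ∈ cur, c = pvV comp fi gi) := by
  induction l with
  | nil => intro st c; simp
  | cons y ys ih =>
    intro st c
    rw [List.foldl_cons, ih, pvAddFold_bits]
    constructor
    · rintro ((h | ⟨x, hx, rfl⟩) | ⟨fi, hfi, gi, hgi, rfl⟩)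
      · exact Or.inl h
      · exact Or.inr ⟨y, List.mem_cons_self, x, hx, rfl⟩
      · exact Or.inr ⟨fi, List.mem_cons_of_mem y hfi, gi, hgi, rfl⟩
    · rintro (h | ⟨fi, hfi, gi, hgi, rfl⟩)
      · exact Or.inl (Or.inl h)
      · rcases List.mem_cons.mp hfi with rfl | hfi
        · exact Or.inl (Or.inr ⟨gi, hgi, rfl⟩)
        · exact Or.inr ⟨fi, hfi, gi, hgi, rfl⟩

lemma pvRoundFold_le (comp cur : List Int) (l : List Int) : ∀ (st : ℕ × Bool),
    st.1 ≤ (l.foldl (fun st fi => cur.foldl (pvAddStep (pvV comp fi)) st) st).1 := by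
  induction l with
  | nil => intro st; exact le_refl _
  | cons y ys ih =>
    intro st
    exact le_trans (pvAddFold_le (pvV comp y) cur st) (ih _)

lemma pvRoundFold_strict (comp cur : List Int) (l : List Int) : ∀ (st : ℕ × Bool),
    ((l.foldl (fun st fi => cur.foldl (pvAddStep (pvV comp fi)) st) st).2 = true) →
      st.2 = true ∨ st.1 < (l.foldl (fun st fi => cur.foldl (pvAddStep (pvV comp fi)) st) st).1 := by
  induction l with
  | nil => intro st h; exact Or.inl h
  | cons y ys ih =>
    intro st h
    rw [List.foldl_cons] at h ⊢
    rcases ih _ h with h2 | h2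
    · rcases pvAddFold_strict (pvV comp y) cur st h2 with h3 | h3
      · exact Or.inl h3
      · exact Or.inr (lt_of_lt_of_le h3 (pvRoundFold_le comp cur ys _))
    · exact Or.inr (lt_of_le_of_lt (pvAddFold_le (pvV comp y) cur st) h2)

lemma pvRoundFold_flag_false (comp cur : List Int) (l : List Int) : ∀ (st : ℕ × Bool),
    ((l.foldl (fun st fi => cur.foldl (pvAddStep (pvV comp fi)) st) st).2 = false) →
      (l.foldl (fun st fi => cur.foldl (pvAddStep (pvV comp fi)) st) st).1 = st.1 ∧
        st.2 = false ∧ ∀ fi ∈ l, ∀ gi ∈ cur, st.1.testBit (pvV comp fi gi) = true := by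
  induction l with
  | nil => intro st h; exact ⟨rfl, h, by simp⟩
  | cons y ys ih =>
    intro st h
    rw [List.foldl_cons] at h ⊢
    obtain ⟨h1, h2, h3⟩ := ih _ h
    obtain ⟨g1, g2, g3⟩ := pvAddFold_flag_false (pvV comp y) cur st h2
    rw [g1] at h1 h3
    refine ⟨h1, g2, fun fi hfi gi hgi => ?_⟩
    rcases List.mem_cons.mp hfi with rfl | hfi
    · exact g3 gi hgi
    · exact h3 fi hfi gi hgi

lemma pvALL_bit (c : ℕ) : ((1 <<< 27 : ℕ) - 1).testBit c = decide (c < 27) := by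
  rw [Nat.one_shiftLeft]
  exact Nat.testBit_two_pow_sub_one 27 c

-- A's while loop computes: "the generated codes cover all 27"
lemma pvLoopA_spec (t : List Int) (hp : pvWF t) : ∀ (fuel S : ℕ),
    (∀ c : ℕ, S.testBit c = true → c < 27 ∧ pvGen t ↑c) →
    S.testBit (pvArb t).toNat = true → S.testBit 21 = true →
    2 ^ 27 ≤ fuel + S →
    (pvLoopA (pvCompA t) fuel S = true ↔ ∀ c : ℕ, c < 27 → pvGen t ↑c) := by
  intro fuel
  induction fuel with
  | zero =>
    intro S hsound _ _ hfuel
    exfalso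
    have hS : S < 2 ^ 27 := by
      refine Nat.lt_pow_two_of_testBit S (fun i hi => ?_)
      rcases hb : S.testBit i
      · rfl
      · exact absurd (hsound i hb).1 (by omega)
    omega
  | succ fuel ih =>
    intro S hsound harb h21 hfuel
    simp only [pvLoopA]
    by_cases hall : S = (1 <<< 27) - 1
    · rw [if_pos (by rw [hall]; exact beq_self_eq_true _)]
      simp only [true_iff]
      intro c hc
      have hbit : S.testBit c = true := by rw [hall, pvALL_bit]; exact decide_eq_true hc
      exact (hsound c hbit).2
    · rw [if_neg (by simpa using hall)]
      rw [pvRoundA_eq]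
      set cur := pvCurrentA S with hcur
      set st := cur.foldl (fun st fi => cur.foldl (pvAddStep (pvV (pvCompA t) fi)) st) (S, false)
        with hst
      have hmem : ∀ x ∈ cur, ∃ i : ℕ, i < 27 ∧ S.testBit i = true ∧ x = ↑i :=
        fun x hx => pv_mem_currentA.mp hx
      have hV : ∀ fi ∈ cur, ∀ gi ∈ cur, pvV (pvCompA t) fi gi = (pvCmp t fi gi).toNat := by
        intro fi hfi gi hgi
        obtain ⟨a, ha, -, rfl⟩ := hmem fi hfi
        obtain ⟨b, hb, -, rfl⟩ := hmem gi hgi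
        unfold pvV
        rw [pvCompA_getD t a b ha hb]
      have hGcur : ∀ x ∈ cur, pvGen t x ∧ 0 ≤ x ∧ x < 27 := by
        intro x hx
        obtain ⟨a, ha, hbit, rfl⟩ := hmem x hx
        have := (hsound a hbit).2
        exact ⟨this, by omega, by exact_mod_cast ha⟩
      have hsound' : ∀ c : ℕ, st.1.testBit c = true → c < 27 ∧ pvGen t ↑c := by
        intro c hc
        rcases (pvRoundFold_bits (pvCompA t) cur cur (S, false) c).mp hc with h | ⟨fi, hfi, gi, hgi, rfl⟩
        · exact hsound c h
        · obtain ⟨hgf, hf0, hf27⟩ := hGcur fi hfi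
          obtain ⟨hgg, hg0, hg27⟩ := hGcur gi hgi
          have hgen : pvGen t (pvCmp t fi gi) := pvGen.comp hgf hgg
          have hbound := pv_cmp_bound t hp ⟨hf0, hf27⟩ ⟨hg0, hg27⟩
          rw [hV fi hfi gi hgi]
          constructor
          · omega
          · rw [show ((((pvCmp t fi gi).toNat : ℕ) : Int)) = pvCmp t fi gi by omega]
            exact hgen
      rcases hflag : st.2
      · simp only [if_neg (Bool.false_ne_true)]
        obtain ⟨h1, -, h3⟩ := pvRoundFold_flag_false (pvCompA t) cur cur (S, false) hflag
        rw [h1]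
        constructor
        · intro hS c hc
          have hbit : S.testBit c = true := by
            rw [beq_iff_eq] at hS
            have hS2 : S = 1 <<< 27 - 1 := hS
            rw [hS2, pvALL_bit]
            exact decide_eq_true hc
          exact (hsound c hbit).2
        · intro hall27
          have hgenbit : ∀ x : Int, pvGen t x → S.testBit x.toNat = true := by
            intro x hx
            induction hx with
            | arb => exact harb
            | id => exact h21
            | @comp f g hf hg ihf ihg =>
              obtain ⟨hf0, hf27⟩ := pv_gen_bound t hp hf
              obtain ⟨hg0, hg27⟩ := pv_gen_bound t hp hg
              have hfin : f ∈ cur := pv_mem_currentA.mpr ⟨f.toNat, by omega, ihf, by omega⟩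
              have hgin : g ∈ cur := pv_mem_currentA.mpr ⟨g.toNat, by omega, ihg, by omega⟩
              have := h3 f hfin g hgin
              rw [hV f hfin g hgin] at this
              exact this
          have hSall : S = (1 <<< 27) - 1 := by
            apply Nat.eq_of_testBit_eq
            intro i
            rw [pvALL_bit]
            by_cases hi : i < 27
            · have := hgenbit (↑i) (hall27 i hi)
              rw [show ((↑i : Int)).toNat = i by omega] at this
              rw [this]
              exact (decide_eq_true hi).symm
            · rcases hb : S.testBit i
              · simp [hi]
              · exact absurd (hsound i hb).1 hi
          exact absurd hSall hall
      · have harb' : st.1.testBit (pvArb t).toNat = true :=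
          (pvRoundFold_bits _ cur cur (S, false) _).mpr (Or.inl harb)
        have h21' : st.1.testBit 21 = true :=
          (pvRoundFold_bits _ cur cur (S, false) _).mpr (Or.inl h21)
        have hstrict : S < st.1 := by
          rcases pvRoundFold_strict (pvCompA t) cur cur (S, false) hflag with h | h
          · exact Bool.noConfusion h
          · exact h
        exact ih st.1 hsound' harb' h21' (by omega)

-- the two seed bits
lemma pv_seed_bits (aN : ℕ) (c : ℕ) :
    (((1 <<< aN) ||| (1 <<< 21) : ℕ).testBit c = true) ↔ (c = aN ∨ c = 21) := by
  rw [Nat.testBit_or, Nat.one_shiftLeft, Nat.one_shiftLeft, Nat.testBit_two_pow,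
    Nat.testBit_two_pow, Bool.or_eq_true]
  constructor
  · rintro (h | h)
    · exact Or.inl (of_decide_eq_true h).symm
    · exact Or.inr (of_decide_eq_true h).symm
  · rintro (rfl | rfl)
    · exact Or.inl (decide_eq_true rfl)
    · exact Or.inr (decide_eq_true rfl)

-- what port A returns on a well-formed table
lemma pv_portA_iff (t : List Int) (hp : pvWF t) :
    (check_unary_complete t = true) ↔ ∀ c : ℕ, c < 27 → pvGen t ↑c := by
  have harb := pv_arb_bound t hp
  have hbits := pv_seed_bits (pvArb t).toNat
  have hspec := pvLoopA_spec t hp (1 <<< 27) ((1 <<< (pvArb t).toNat) ||| (1 <<< 21))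
    (by
      intro c hc
      rcases (hbits c).mp hc with rfl | rfl
      · refine ⟨by omega, ?_⟩
        rw [show (((pvArb t).toNat : ℕ) : Int) = pvArb t by omega]
        exact pvGen.arb
      · exact ⟨by omega, pvGen.id⟩)
    ((hbits _).mpr (Or.inl rfl)) ((hbits _).mpr (Or.inr rfl))
    (by rw [Nat.one_shiftLeft]; omega)
  exact hspec

-- ===== B's worklist: scan characterizations =====
lemma pvScanB_eq_filter (S : Nat) :
    pvScanB S = (PySem.List.pyRange 0 27 1).filter (fun i => S >>> i.toNat &&& 1 == 1) := by
  unfold pvScanB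
  rw [PySem.List.foldl_append_if_eq_filter, List.nil_append]

lemma pvNewB_eq_filter (before S : Nat) :
    pvNewB before S = (PySem.List.pyRange 0 27 1).filter
      (fun i => (S >>> i.toNat &&& 1 == 1) && !(before >>> i.toNat &&& 1 == 1)) := by
  unfold pvNewB
  rw [PySem.List.foldl_append_if_eq_filter, List.nil_append]

lemma pv_mem_scanB {S : Nat} {c : Int} :
    c ∈ pvScanB S ↔ 0 ≤ c ∧ c < 27 ∧ S.testBit c.toNat = true := by
  rw [pvScanB_eq_filter, List.mem_filter, PySem.List.mem_pyRange_one, ← pv_testBit_eq]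
  constructor
  · rintro ⟨⟨h1, h2⟩, h3⟩
    exact ⟨h1, h2, h3⟩
  · rintro ⟨h1, h2, h3⟩
    exact ⟨⟨h1, h2⟩, h3⟩

lemma pv_mem_newB {before S : Nat} {c : Int} :
    c ∈ pvNewB before S ↔
      0 ≤ c ∧ c < 27 ∧ S.testBit c.toNat = true ∧ before.testBit c.toNat = false := by
  rw [pvNewB_eq_filter, List.mem_filter, PySem.List.mem_pyRange_one]
  rw [show ((S >>> c.toNat &&& 1 == 1) && !(before >>> c.toNat &&& 1 == 1))
      = (S.testBit c.toNat && !before.testBit c.toNat) from by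
    rw [← pv_testBit_eq, ← pv_testBit_eq]]
  constructor
  · rintro ⟨⟨h1, h2⟩, h3⟩
    rw [Bool.and_eq_true, Bool.not_eq_true'] at h3
    exact ⟨h1, h2, h3.1, h3.2⟩
  · rintro ⟨h1, h2, h3, h4⟩
    exact ⟨⟨h1, h2⟩, by rw [Bool.and_eq_true, Bool.not_eq_true']; exact ⟨h3, h4⟩⟩

-- list length / count bookkeeping for the worklist measure
lemma pv_countP_split (l : List ℕ) (p q : ℕ → Bool) (h : ∀ x ∈ l, p x = true → q x = true) :
    l.countP q = l.countP p + l.countP (fun x => q x && ! p x) := by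
  induction l with
  | nil => simp
  | cons a l ih =>
    have ha := h a List.mem_cons_self
    rw [List.countP_cons, List.countP_cons, List.countP_cons,
      ih (fun x hx => h x (List.mem_cons_of_mem a hx))]
    rcases hp : p a <;> rcases hq : q a <;> simp [hp, hq] at ha ⊢ <;> omega

lemma pv_filter_pyRange_countP (P : ℕ → Bool) :
    ((PySem.List.pyRange 0 27 1).filter (fun i => P i.toNat)).length
      = (List.range 27).countP P := by
  rw [show PySem.List.pyRange 0 27 1 = (List.range 27).map (fun k => ((k : ℕ) : Int)) from by
    decide]
  rw [List.filter_map, List.length_map, ← List.countP_eq_length_filter]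
  exact List.countP_congr (fun x _ => by rw [Function.comp_apply, Int.toNat_natCast])

lemma pv_length_scanB (S : Nat) :
    (pvScanB S).length = (List.range 27).countP (fun i => S.testBit i) := by
  rw [pvScanB_eq_filter]
  rw [show (fun i : Int => S >>> i.toNat &&& 1 == 1)
      = (fun i : Int => S.testBit i.toNat) from funext (fun i => (pv_testBit_eq S i.toNat).symm)]
  exact pv_filter_pyRange_countP (fun n => S.testBit n)

lemma pv_length_newB (before S : Nat) :
    (pvNewB before S).length
      = (List.range 27).countP (fun i => S.testBit i && ! before.testBit i) := by
  rw [pvNewB_eq_filter]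
  rw [show (fun i : Int => (S >>> i.toNat &&& 1 == 1) && !(before >>> i.toNat &&& 1 == 1))
      = (fun i : Int => S.testBit i.toNat && ! before.testBit i.toNat) from
    funext (fun i => by rw [← pv_testBit_eq, ← pv_testBit_eq])]
  exact pv_filter_pyRange_countP (fun n => S.testBit n && ! before.testBit n)

-- bits of the inner composition fold
lemma pvInnerB_bits (t : List Int) (f : Int) (S : Nat) (g : Int) (c : ℕ) :
    ((pvInnerB t f S g).testBit c = true) ↔
      (S.testBit c = true ∨ c = (pvCmp t f g).toNat ∨ c = (pvCmp t g f).toNat) := by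
  unfold pvInnerB
  simp only [Nat.testBit_or, Nat.one_shiftLeft, Nat.testBit_two_pow, Bool.or_eq_true]
  constructor
  · rintro ((h | h) | h)
    · exact Or.inl h
    · exact Or.inr (Or.inl (of_decide_eq_true h).symm)
    · exact Or.inr (Or.inr (of_decide_eq_true h).symm)
  · rintro (h | h | h)
    · exact Or.inl (Or.inl h)
    · exact Or.inl (Or.inr (decide_eq_true h.symm))
    · exact Or.inr (decide_eq_true h.symm)

lemma pvOrFold_bits (t : List Int) (f : Int) (l : List Int) : ∀ (S : Nat) (c : ℕ),
    ((l.foldl (pvInnerB t f) S).testBit c = true) ↔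
      (S.testBit c = true ∨ ∃ g ∈ l, c = (pvCmp t f g).toNat ∨ c = (pvCmp t g f).toNat) := by
  induction l with
  | nil => intro S c; simp
  | cons y ys ih =>
    intro S c
    rw [List.foldl_cons, ih, pvInnerB_bits]
    constructor
    · rintro ((h | h) | ⟨g, hg, h⟩)
      · exact Or.inl h
      · exact Or.inr ⟨y, List.mem_cons_self, h⟩
      · exact Or.inr ⟨g, List.mem_cons_of_mem y hg, h⟩
    · rintro (h | ⟨g, hg, h⟩)
      · exact Or.inl (Or.inl h)
      · rcases List.mem_cons.mp hg with rfl | hg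
        · exact Or.inl (Or.inr h)
        · exact Or.inr ⟨g, hg, h⟩

lemma pvStepB_bits (t : List Int) (f : Int) (S : Nat) (c : ℕ) :
    ((pvStepB t f S).testBit c = true) ↔
      (S.testBit c = true ∨
        ∃ g ∈ pvScanB S, c = (pvCmp t f g).toNat ∨ c = (pvCmp t g f).toNat) :=
  pvOrFold_bits t f (pvScanB S) S c

-- the final test: S == ALL_BITS iff the generated codes cover all 27 (todo exhausted)
lemma pv_finalB_iff (t : List Int) (hp : pvWF t) (S : Nat)
    (hsound : ∀ c : ℕ, S.testBit c = true → c < 27 ∧ pvGen t ↑c)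
    (harb : S.testBit (pvArb t).toNat = true) (h21 : S.testBit 21 = true)
    (hcl : ∀ fc gc : ℕ, fc < 27 → gc < 27 → S.testBit fc = true → S.testBit gc = true →
      S.testBit (pvCmp t ↑fc ↑gc).toNat = true) :
    ((S == (1 <<< 27) - 1) = true ↔ ∀ c : ℕ, c < 27 → pvGen t ↑c) := by
  constructor
  · intro hS c hc
    have hbit : S.testBit c = true := by
      rw [beq_iff_eq] at hS
      rw [hS, pvALL_bit]
      exact decide_eq_true hc
    exact (hsound c hbit).2
  · intro hall27
    have hgenbit : ∀ x : Int, pvGen t x → S.testBit x.toNat = true := by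
      intro x hx
      induction hx with
      | arb => exact harb
      | id => exact h21
      | @comp f g hf hg ihf ihg =>
        obtain ⟨hf0, hf27⟩ := pv_gen_bound t hp hf
        obtain ⟨hg0, hg27⟩ := pv_gen_bound t hp hg
        have := hcl f.toNat g.toNat (by omega) (by omega) ihf ihg
        rw [show ((f.toNat : ℕ) : Int) = f by omega, show ((g.toNat : ℕ) : Int) = g by omega]
          at this
        exact this
    have hSall : S = (1 <<< 27) - 1 := by
      apply Nat.eq_of_testBit_eq
      intro i
      rw [pvALL_bit]
      by_cases hi : i < 27
      · have := hgenbit (↑i) (hall27 i hi)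
        rw [show ((↑i : Int)).toNat = i by omega] at this
        rw [this]
        exact (decide_eq_true hi).symm
      · rcases hb : S.testBit i
        · simp [hi]
        · exact absurd (hsound i hb).1 hi
    exact beq_iff_eq.mpr hSall

-- B's while loop computes: "the generated codes cover all 27"
lemma pvLoopB_spec (t : List Int) (hp : pvWF t) :
    ∀ (fuel : ℕ) (S : Nat) (todo : List Int),
      (∀ c : ℕ, S.testBit c = true → c < 27 ∧ pvGen t ↑c) →
      S.testBit (pvArb t).toNat = true → S.testBit 21 = true →
      (∀ x ∈ todo, 0 ≤ x ∧ x < 27 ∧ S.testBit x.toNat = true) →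
      (∀ fc gc : ℕ, fc < 27 → gc < 27 → S.testBit fc = true → S.testBit gc = true →
        (↑fc : Int) ∉ todo → (↑gc : Int) ∉ todo → S.testBit (pvCmp t ↑fc ↑gc).toNat = true) →
      todo.length + 2 * (27 - (List.range 27).countP (fun i => S.testBit i)) ≤ fuel →
      (pvLoopB t fuel S todo = true ↔ ∀ c : ℕ, c < 27 → pvGen t ↑c) := by
  intro fuel
  induction fuel with
  | zero =>
    intro S todo hsound harb h21 htodo hcl hfuel
    have htz : todo = [] := List.eq_nil_of_length_eq_zero (by omega)
    subst htz
    simp only [pvLoopB]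
    exact pv_finalB_iff t hp S hsound harb h21
      (fun fc gc h1 h2 h3 h4 =>
        hcl fc gc h1 h2 h3 h4 (List.not_mem_nil) (List.not_mem_nil))
  | succ fuel ih =>
    intro S todo hsound harb h21 htodo hcl hfuel
    rcases List.eq_nil_or_concat todo with rfl | ⟨rest, f, rfl⟩
    · simp only [pvLoopB, List.getLast?_nil]
      exact pv_finalB_iff t hp S hsound harb h21
        (fun fc gc h1 h2 h3 h4 =>
          hcl fc gc h1 h2 h3 h4 (List.not_mem_nil) (List.not_mem_nil))
    · rw [List.concat_eq_append] at htodo hcl hfuel ⊢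
      simp only [pvLoopB, List.getLast?_concat, List.dropLast_concat]
      obtain ⟨hf0, hf27, hfbit⟩ :=
        htodo f (List.mem_append_right _ (List.mem_singleton.mpr rfl))
      set S2 := pvStepB t f S with hS2
      have hmono : ∀ c : ℕ, S.testBit c = true → S2.testBit c = true := by
        intro c hc
        rw [hS2, pvStepB_bits]
        exact Or.inl hc
      have hscan_gen : ∀ g ∈ pvScanB S, pvGen t g ∧ 0 ≤ g ∧ g < 27 := by
        intro g hg
        obtain ⟨hg0, hg27, hgbit⟩ := pv_mem_scanB.mp hg
        have := (hsound g.toNat hgbit).2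
        rw [show ((g.toNat : ℕ) : Int) = g by omega] at this
        exact ⟨this, hg0, hg27⟩
      have hfgen : pvGen t f := by
        have := (hsound f.toNat hfbit).2
        rw [show ((f.toNat : ℕ) : Int) = f by omega] at this
        exact this
      have hsound2 : ∀ c : ℕ, S2.testBit c = true → c < 27 ∧ pvGen t ↑c := by
        intro c hc
        rw [hS2, pvStepB_bits] at hc
        rcases hc with hc | ⟨g, hg, hor⟩
        · exact hsound c hc
        · obtain ⟨hggen, hg0, hg27⟩ := hscan_gen g hg
          rcases hor with rfl | rfl
          · have hb := pv_cmp_bound t hp ⟨hf0, hf27⟩ ⟨hg0, hg27⟩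
            refine ⟨by omega, ?_⟩
            rw [show (((pvCmp t f g).toNat : ℕ) : Int) = pvCmp t f g by omega]
            exact pvGen.comp hfgen hggen
          · have hb := pv_cmp_bound t hp ⟨hg0, hg27⟩ ⟨hf0, hf27⟩
            refine ⟨by omega, ?_⟩
            rw [show (((pvCmp t g f).toNat : ℕ) : Int) = pvCmp t g f by omega]
            exact pvGen.comp hggen hfgen
      have hstep_complete : ∀ g ∈ pvScanB S,
          S2.testBit (pvCmp t f g).toNat = true ∧ S2.testBit (pvCmp t g f).toNat = true := by
        intro g hg
        constructor
        · rw [hS2, pvStepB_bits]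
          exact Or.inr ⟨g, hg, Or.inl rfl⟩
        · rw [hS2, pvStepB_bits]
          exact Or.inr ⟨g, hg, Or.inr rfl⟩
      have htodo2 : ∀ x ∈ rest ++ pvNewB S S2, 0 ≤ x ∧ x < 27 ∧ S2.testBit x.toNat = true := by
        intro x hx
        rcases List.mem_append.mp hx with hx | hx
        · obtain ⟨h1, h2, h3⟩ := htodo x (List.mem_append_left _ hx)
          exact ⟨h1, h2, hmono _ h3⟩
        · obtain ⟨h1, h2, h3, -⟩ := pv_mem_newB.mp hx
          exact ⟨h1, h2, h3⟩
      have hcl2 : ∀ fc gc : ℕ, fc < 27 → gc < 27 →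
          S2.testBit fc = true → S2.testBit gc = true →
          (↑fc : Int) ∉ rest ++ pvNewB S S2 → (↑gc : Int) ∉ rest ++ pvNewB S S2 →
          S2.testBit (pvCmp t ↑fc ↑gc).toNat = true := by
        intro fc gc hfc27 hgc27 hfcb hgcb hfcq hgcq
        have hold : ∀ c : ℕ, c < 27 → S2.testBit c = true →
            (↑c : Int) ∉ rest ++ pvNewB S S2 → S.testBit c = true := by
          intro c hc27 hcb hcq
          rcases hcb2 : S.testBit c
          · exfalso
            apply hcq
            refine List.mem_append_right _ (pv_mem_newB.mpr ⟨by omega, ?_, ?_, ?_⟩)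
            · exact_mod_cast hc27
            · rw [show ((↑c : Int)).toNat = c by omega]; exact hcb
            · rw [show ((↑c : Int)).toNat = c by omega]; exact hcb2
          · rfl
        have hfcS : S.testBit fc = true := hold fc hfc27 hfcb hfcq
        have hgcS : S.testBit gc = true := hold gc hgc27 hgcb hgcq
        have hfc_scan : (↑fc : Int) ∈ pvScanB S := by
          refine pv_mem_scanB.mpr ⟨by omega, by exact_mod_cast hfc27, ?_⟩
          rw [show ((↑fc : Int)).toNat = fc by omega]
          exact hfcS
        have hgc_scan : (↑gc : Int) ∈ pvScanB S := by
          refine pv_mem_scanB.mpr ⟨by omega, by exact_mod_cast hgc27, ?_⟩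
          rw [show ((↑gc : Int)).toNat = gc by omega]
          exact hgcS
        by_cases hfcf : (↑fc : Int) = f
        · rw [hfcf]
          exact (hstep_complete _ hgc_scan).1
        · by_cases hgcf : (↑gc : Int) = f
          · rw [hgcf]
            exact (hstep_complete _ hfc_scan).2
          · have hfcq2 : (↑fc : Int) ∉ rest ++ [f] := by
              intro hmem
              rcases List.mem_append.mp hmem with h | h
              · exact hfcq (List.mem_append_left _ h)
              · exact hfcf (List.mem_singleton.mp h)
            have hgcq2 : (↑gc : Int) ∉ rest ++ [f] := by
              intro hmem
              rcases List.mem_append.mp hmem with h | h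
              · exact hgcq (List.mem_append_left _ h)
              · exact hgcf (List.mem_singleton.mp h)
            exact hmono _ (hcl fc gc hfc27 hgc27 hfcS hgcS hfcq2 hgcq2)
      have hmeas : (rest ++ pvNewB S S2).length
          + 2 * (27 - (List.range 27).countP (fun i => S2.testBit i)) ≤ fuel := by
        have hsplit : (List.range 27).countP (fun i => S2.testBit i)
            = (List.range 27).countP (fun i => S.testBit i)
              + (List.range 27).countP (fun i => S2.testBit i && ! S.testBit i) :=
          pv_countP_split (List.range 27) (fun i => S.testBit i) (fun i => S2.testBit i)
            (fun x _ hx => hmono x hx)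
        have hle : (List.range 27).countP (fun i => S2.testBit i) ≤ 27 := by
          have h27 := List.countP_le_length (p := fun i => S2.testBit i) (l := List.range 27)
          simpa using h27
        simp only [List.length_append, List.length_singleton] at hfuel ⊢
        rw [pv_length_newB S S2, hsplit] at *
        omega
      exact ih S2 (rest ++ pvNewB S S2) hsound2 (hmono _ harb) (hmono _ h21)
        htodo2 hcl2 hmeas

-- what port B returns on a well-formed table
lemma pv_portB_iff (t : List Int) (hp : pvWF t) :
    (check_unary_complete_alt t = true) ↔ ∀ c : ℕ, c < 27 → pvGen t ↑c := by
  have harb := pv_arb_bound t hp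
  have hbits := pv_seed_bits (pvArb t).toNat
  set S0 : ℕ := (1 <<< (pvArb t).toNat) ||| (1 <<< 21) with hS0
  have heq : check_unary_complete_alt t = pvLoopB t 64 S0 (pvScanB S0) := rfl
  rw [heq]
  refine pvLoopB_spec t hp 64 S0 (pvScanB S0) ?_ ?_ ?_ ?_ ?_ ?_
  · intro c hc
    rcases (hbits c).mp hc with rfl | rfl
    · refine ⟨by omega, ?_⟩
      rw [show (((pvArb t).toNat : ℕ) : Int) = pvArb t by omega]
      exact pvGen.arb
    · exact ⟨by omega, pvGen.id⟩
  · exact (hbits _).mpr (Or.inl rfl)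
  · exact (hbits _).mpr (Or.inr rfl)
  · intro x hx
    exact pv_mem_scanB.mp hx
  · intro fc gc hfc27 hgc27 hfcb hgcb hfcq hgcq
    exfalso
    apply hfcq
    refine pv_mem_scanB.mpr ⟨by omega, by exact_mod_cast hfc27, ?_⟩
    rw [show ((↑fc : Int)).toNat = fc by omega]
    exact hfcb
  · have hlen := pv_length_scanB S0
    have hle : (List.range 27).countP (fun i => S0.testBit i) ≤ 27 := by
      have h27 := List.countP_le_length (p := fun i => S0.testBit i) (l := List.range 27)
      simpa using h27
    omega


-- ===== the arb ≥ 27 regime: both versions return False immediately =====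
lemma pvCmp_21_21 (t : List Int) : pvCmp t 21 21 = pvArb t := by
  unfold pvCmp pvArb
  rw [show PySem.Int.mod 21 3 = 0 from by decide,
    show PySem.Int.mod (PySem.Int.floordiv 21 3) 3 = 1 from by decide,
    show PySem.Int.floordiv 21 9 = 2 from by decide]
  norm_num

lemma pv_portA_false (t : List Int) (ha : 27 ≤ pvArb t) : check_unary_complete t = false := by
  have heq : check_unary_complete t =
      pvLoopA (pvCompA t) (1 <<< 27) ((1 <<< (pvArb t).toNat) ||| (1 <<< 21)) := rfl
  rw [heq]
  set S0 : ℕ := (1 <<< (pvArb t).toNat) ||| (1 <<< 21) with hS0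
  have harbN : 27 ≤ (pvArb t).toNat := by omega
  have hSne : S0 ≠ (1 <<< 27) - 1 := by
    intro h
    have h1 : S0.testBit (pvArb t).toNat = true := (pv_seed_bits _ _).mpr (Or.inl rfl)
    rw [h, pvALL_bit] at h1
    exact absurd (of_decide_eq_true h1) (by omega)
  rw [show (1 <<< 27 : ℕ) = 134217727 + 1 from by decide]
  rw [pvLoopA]
  rw [if_neg (by simpa using hSne)]
  have hcur : pvCurrentA S0 = [(21 : Int)] := by
    rw [pvCurrentA_eq]
    have hcongr : ∀ i ∈ List.range 27,
        (if S0.testBit i then some ((i : ℕ) : Int) else none) =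
          (if i = 21 then some ((i : ℕ) : Int) else none) := by
      intro i hi
      have hi27 := List.mem_range.mp hi
      by_cases h21 : i = 21
      · subst h21
        rw [if_pos ((pv_seed_bits _ _).mpr (Or.inr rfl)), if_pos rfl]
      · have hfalse : S0.testBit i = false := by
          rcases hb : S0.testBit i
          · rfl
          · rcases (pv_seed_bits _ _).mp hb with rfl | rfl
            · omega
            · exact absurd rfl h21
        rw [hfalse, if_neg h21]
        exact if_neg (Bool.false_ne_true)
    rw [List.filterMap_congr hcongr]
    decide
  rw [pvRoundA_eq, hcur]
  simp only [List.foldl_cons, List.foldl_nil]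
  have hv : pvV (pvCompA t) 21 21 = (pvArb t).toNat := by
    unfold pvV
    have hlookup := pvCompA_getD t 21 21 (by omega) (by omega)
    rw [show (((21 : ℕ) : Int)) = (21 : Int) from by norm_num] at hlookup
    rw [hlookup, pvCmp_21_21]
  unfold pvAddStep
  rw [hv, pv_and_pow, (pv_seed_bits _ _).mpr (Or.inl rfl)]
  simp only [Bool.not_true, if_neg (Bool.false_ne_true)]
  rw [beq_eq_false_iff_ne]
  exact hSne

lemma pv_portB_false (t : List Int) (ha : 27 ≤ pvArb t) :
    check_unary_complete_alt t = false := by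
  set S0 : ℕ := (1 <<< (pvArb t).toNat) ||| (1 <<< 21) with hS0def
  have harbN : 27 ≤ (pvArb t).toNat := by omega
  have hSne : S0 ≠ (1 <<< 27) - 1 := by
    intro h
    have h1 : S0.testBit (pvArb t).toNat = true := (pv_seed_bits _ _).mpr (Or.inl rfl)
    rw [h, pvALL_bit] at h1
    exact absurd (of_decide_eq_true h1) (by omega)
  have hscan : pvScanB S0 = [(21 : Int)] := by
    rw [pvScanB_eq_filter]
    have hcongr : ∀ i ∈ PySem.List.pyRange 0 27 1,
        (S0 >>> i.toNat &&& 1 == 1) = (i == 21) := by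
      intro i hi
      obtain ⟨hi0, hi27⟩ := PySem.List.mem_pyRange_one.mp hi
      rw [← pv_testBit_eq]
      by_cases h21 : i = 21
      · subst h21
        rw [show ((21 : Int)).toNat = 21 from rfl,
          (pv_seed_bits _ _).mpr (Or.inr rfl)]
        rfl
      · have hfalse : S0.testBit i.toNat = false := by
          rcases hb : S0.testBit i.toNat
          · rfl
          · rcases (pv_seed_bits _ _).mp hb with he | he
            · omega
            · exact absurd (by omega : i = 21) h21
        rw [hfalse]
        exact (beq_eq_false_iff_ne.mpr h21).symm
    rw [List.filter_congr hcongr]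
    decide
  have hcmp : (pvCmp t 21 21).toNat = (pvArb t).toNat := by rw [pvCmp_21_21]
  have hstep : pvStepB t 21 S0 = S0 := by
    unfold pvStepB
    rw [hscan, List.foldl_cons, List.foldl_nil]
    unfold pvInnerB
    rw [hcmp]
    apply Nat.eq_of_testBit_eq
    intro i
    rw [hS0def]
    simp only [Nat.testBit_or]
    rcases (1 <<< (pvArb t).toNat : ℕ).testBit i <;>
      rcases (1 <<< 21 : ℕ).testBit i <;> rfl
  have hnew : pvNewB S0 S0 = [] := by
    rw [pvNewB_eq_filter]
    have hcongr : ∀ i ∈ PySem.List.pyRange 0 27 1,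
        ((S0 >>> i.toNat &&& 1 == 1) && !(S0 >>> i.toNat &&& 1 == 1)) = false := by
      intro i hi
      rcases (S0 >>> i.toNat &&& 1 == 1) <;> rfl
    rw [List.filter_congr hcongr]
    exact List.filter_false _
  have heq : check_unary_complete_alt t = pvLoopB t 64 S0 (pvScanB S0) := rfl
  rw [heq, hscan]
  rw [show (64 : ℕ) = 63 + 1 from rfl, pvLoopB]
  show pvLoopB t 63 (pvStepB t 21 S0) ([(21 : Int)].dropLast ++ pvNewB S0 (pvStepB t 21 S0))
      = false
  rw [hstep, hnew]
  show pvLoopB t 63 S0 [] = false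
  rw [show (63 : ℕ) = 62 + 1 from rfl, pvLoopB]
  show (S0 == (1 <<< 27) - 1) = false
  rw [beq_eq_false_iff_ne]
  exact hSne

-- ===== VERDICT (by name: the statement is the Claim_ definition above) =====
theorem check_unary_complete_spec : Claim_equal_check_unary_complete := by
  intro gate_tt hdom hpre
  unfold Spec_check_unary_complete
  rcases hpre.2 with hwf | harb
  · have hp : pvWF gate_tt := ⟨hpre.1, hwf⟩
    have hA := pv_portA_iff gate_tt hp
    have hB := pv_portB_iff gate_tt hp
    rcases hb : check_unary_complete_alt gate_tt
    · rcases ha : check_unary_complete gate_tt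
      · rfl
      · exact absurd (hB.mpr (hA.mp ha)) (by rw [hb]; exact Bool.false_ne_true)
    · exact hA.mpr (hB.mp hb)
  · rw [pv_portA_false gate_tt harb, pv_portB_false gate_tt harb]
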